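-- pv_equiv track=rewrite | github.com/Tanser2024/Tanser-s_study_data | practice8/01883.py | k_lst
-- ===== SOURCE A (Python) =====
-- def k_lst(lst,k):
--     t=-3
--     if k==0:
--         return lst
--     for i in range(len(lst)-1,0,-1):
--         if lst[i]>lst[i-1]:
--             t=i-1
--             break
--     if t==-3:
--
--         return k_lst(lst[::-1],k-1)
--     n=t+1
--     for j in range(t,len(lst)):
--         if lst[j]>lst[t]:
--             n=j
--     lst[t],lst[n]=lst[n],lst[t]
--     lst[t + 1:] = lst[t + 1:][::-1]
--     return k_lst(lst,k-1)
-- ===== SOURCE B (Python) =====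
-- def k_lst(lst, k):
--     # Iterative next-permutation with wraparound; pure (returns a new list,
--     # unlike A which mutates lst in place); equivalence is about the return value.
--     cur = list(lst)
--     for _ in range(k):
--         t = -1
--         for i in range(len(cur) - 1):
--             if cur[i] < cur[i + 1]:
--                 t = i
--         if t == -1:
--             cur = sorted(cur)
--         else:
--             pivot = cur[t]
--             suffix = cur[t + 1:]
--             succ = min(x for x in suffix if x > pivot)
--             suffix.remove(succ)
--             cur = cur[:t] + [succ] + sorted(suffix + [pivot])
--     return cur
-- ===== Notes on version B (the rewrite author's own statement) =====
-- stated objective: alternative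
-- what changed: A's tail recursion (right-to-left break scan for the pivot, keep-last scan for the successor index, swap + suffix reversal) is replaced by an iterative loop whose step finds the pivot with a single left-to-right scan, picks the successor as the minimum suffix value exceeding the pivot, and rebuilds the suffix with a sort instead of a swap-and-reverse; B is pure (returns a fresh list) while A mutates lst in place, so the equivalence is about the return value only.
-- outside the precondition, e.g. on k_lst([0, 1], 950): A returns [0, 1], B returns [0, 1]
import Mathlib
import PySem

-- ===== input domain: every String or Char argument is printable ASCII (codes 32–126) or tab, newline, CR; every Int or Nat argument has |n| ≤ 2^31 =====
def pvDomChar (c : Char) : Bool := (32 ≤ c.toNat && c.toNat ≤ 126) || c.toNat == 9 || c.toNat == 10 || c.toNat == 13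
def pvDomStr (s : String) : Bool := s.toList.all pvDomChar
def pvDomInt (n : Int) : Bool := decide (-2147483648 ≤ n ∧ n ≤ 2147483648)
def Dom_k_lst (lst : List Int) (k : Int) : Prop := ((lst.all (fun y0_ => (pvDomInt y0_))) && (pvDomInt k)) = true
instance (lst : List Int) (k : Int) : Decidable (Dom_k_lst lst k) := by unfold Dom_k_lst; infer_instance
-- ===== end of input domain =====

-- B replaces A's tail recursion (right-to-left break scan, keep-last successor scan,
-- swap + suffix reversal) by an iterative loop whose step scans left-to-right for the
-- pivot, takes the minimum suffix value above the pivot and re-sorts the suffix.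
-- A mutates lst in place, B does not: the equivalence proved here is about the RETURN value only.

-- ===== PORT A =====
-- 'for i in range(len(lst)-1, 0, -1): if lst[i] > lst[i-1]: t = i-1; break' (t = -3 if no break)
def kLstFindT (lst : List Int) : List Int → Int
  | [] => -3
  | i :: rest =>
      if PySem.List.pyGetD lst (i - 1) 0 < PySem.List.pyGetD lst i 0 then i - 1
      else kLstFindT lst rest

-- the pivot branch of A's body: the 'n' loop, the swap, and the in-place suffix reversal
def kLstPivot (lst : List Int) (t : Int) : List Int :=
  let n := (PySem.List.pyRange t (lst.length : Int) 1).foldl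
      (fun n j => if PySem.List.pyGetD lst t 0 < PySem.List.pyGetD lst j 0 then j else n) (t + 1)
  let lst1 := PySem.List.pySetD (PySem.List.pySetD lst t (PySem.List.pyGetD lst n 0)) n
      (PySem.List.pyGetD lst t 0)
  -- lst[t+1:] = lst[t+1:][::-1]
  PySem.List.slice lst1 none (some (t + 1)) ++ (PySem.List.slice lst1 (some (t + 1)) none).reverse

def k_lst (lst : List Int) (k : Int) : List Int :=
  if k = 0 then lst
  else if k < 0 then lst   -- totalisation guard: for k < 0 the Python recursion never returns (excluded by Pre_)
  else
    let t := kLstFindT lst (PySem.List.pyRange ((lst.length : Int) - 1) 0 (-1))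
    if t = -3 then k_lst lst.reverse (k - 1)
    else k_lst (kLstPivot lst t) (k - 1)
termination_by k.toNat
decreasing_by all_goals omega

-- ===== PORT B =====
-- one step: next permutation (with wraparound to the sorted list)
def kLstAltStep (cur : List Int) : List Int :=
  let t := (PySem.List.pyRange 0 ((cur.length : Int) - 1) 1).foldl
      (fun t i => if PySem.List.pyGetD cur i 0 < PySem.List.pyGetD cur (i + 1) 0 then i else t) (-1)
  if t = -1 then PySem.List.sorted cur (fun x => x) false
  else
    let pivot := PySem.List.pyGetD cur t 0
    let suffix := PySem.List.slice cur (some (t + 1)) none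
    match PySem.List.min? (suffix.filter (fun x => pivot < x)) (fun x => x) with
    | none => cur   -- unreachable (Python min would raise): the pivot's right neighbour is in the filter
    | some succ =>
        let suffix' := (PySem.List.remove? suffix succ).getD suffix
        PySem.List.slice cur none (some t) ++ [succ] ++
          PySem.List.sorted (suffix' ++ [pivot]) (fun x => x) false

def k_lst_alt (lst : List Int) (k : Int) : List Int :=
  (PySem.List.pyRange 0 k 1).foldl (fun cur _ => kLstAltStep cur) lst

-- ===== PRECONDITION & SPEC =====
-- Pre_ excludes k < 0, where A recurses forever (RecursionError), and k > 900, where A's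
-- recursion depth k approaches/exceeds CPython's recursion limit (A raises RecursionError from
-- k ≈ 998; the margin 901–997, where A still returns, is excluded because the exact cutoff is
-- environment-dependent).
def Pre_k_lst (lst : List Int) (k : Int) : Prop := 0 ≤ k ∧ k ≤ 900
instance (lst : List Int) (k : Int) : Decidable (Pre_k_lst lst k) := by
  unfold Pre_k_lst; infer_instance

def pvWitness_k_lst : List Int × Int := ([1, 2, 3], 2)

def Spec_k_lst (lst : List Int) (k : Int) (out : List Int) : Prop := out = k_lst_alt lst k
instance (lst : List Int) (k : Int) (out : List Int) : Decidable (Spec_k_lst lst k out) := by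
  unfold Spec_k_lst; infer_instance

-- ===== CLAIM =====
def Claim_equal_k_lst : Prop :=
  ∀ (lst : List Int) (k : Int), Dom_k_lst lst k → Pre_k_lst lst k → Spec_k_lst lst k (k_lst lst k)

-- ===== LEMMAS AND PROOFS =====

-- A's whole recursion step as a function (the body of k_lst for 0 < k)
def kLstStep (lst : List Int) : List Int :=
  let t := kLstFindT lst (PySem.List.pyRange ((lst.length : Int) - 1) 0 (-1))
  if t = -3 then lst.reverse else kLstPivot lst t

lemma foldl_const_eq_iterate {α β : Type} (f : α → α) (l : List β) (init : α) :
    l.foldl (fun c _ => f c) init = f^[l.length] init := by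
  induction l generalizing init with
  | nil => rfl
  | cons x xs ih => simp [List.foldl_cons, ih, Function.iterate_succ_apply]

lemma k_lst_eq_iterate (n : Nat) : ∀ (lst : List Int) (k : Int), k.toNat = n → 0 ≤ k →
    k_lst lst k = kLstStep^[n] lst := by
  induction n with
  | zero =>
    intro lst k hn hk
    have hk0 : k = 0 := by omega
    rw [k_lst, if_pos hk0]
    rfl
  | succ n ih =>
    intro lst k hn hk
    have hk0 : ¬ k = 0 := by omega
    have hkn : ¬ k < 0 := by omega
    rw [k_lst, if_neg hk0, if_neg hkn, Function.iterate_succ_apply]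
    show (let t := kLstFindT lst (PySem.List.pyRange ((lst.length : Int) - 1) 0 (-1));
      if t = -3 then k_lst lst.reverse (k - 1) else k_lst (kLstPivot lst t) (k - 1))
      = kLstStep^[n] (kLstStep lst)
    unfold kLstStep
    by_cases h : kLstFindT lst (PySem.List.pyRange ((lst.length : Int) - 1) 0 (-1)) = -3
    · simp only [h, if_pos]
      exact ih lst.reverse (k - 1) (by omega) (by omega)
    · simp only [if_neg h]
      exact ih _ (k - 1) (by omega) (by omega)

lemma k_lst_alt_eq_iterate (lst : List Int) (k : Int) :
    k_lst_alt lst k = kLstAltStep^[k.toNat] lst := by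
  unfold k_lst_alt
  rw [foldl_const_eq_iterate]
  congr 1
  rw [PySem.List.length_pyRange_one]
  omega

-- ---- generic scan lemmas ----

-- a keep-last-match fold is find? on the reversed list
lemma foldl_keepLast (q : Int → Bool) (l : List Int) (init : Int) :
    l.foldl (fun acc i => if q i then i else acc) init = (l.reverse.find? q).getD init := by
  induction l generalizing init with
  | nil => rfl
  | cons x xs ih =>
    rw [List.foldl_cons, ih, List.reverse_cons, List.find?_append]
    cases h : xs.reverse.find? q with
    | some v => simp [h]
    | none => by_cases hq : q x <;> simp [hq]

-- A's break loop is find? then shift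
lemma findT_eq (lst : List Int) (l : List Int) :
    kLstFindT lst l
      = ((l.find? (fun i => decide (PySem.List.pyGetD lst (i - 1) 0 < PySem.List.pyGetD lst i 0))).map
          (fun i => i - 1)).getD (-3) := by
  induction l with
  | nil => rfl
  | cons x xs ih =>
    rw [kLstFindT, List.find?_cons]
    by_cases h : PySem.List.pyGetD lst (x - 1) 0 < PySem.List.pyGetD lst x 0
    · simp [h]
    · simp only [h, decide_false, Bool.false_eq_true, if_false, ih]

lemma findq_congr {α : Type} (l : List α) (p q : α → Bool) (h : ∀ x ∈ l, p x = q x) :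
    l.find? p = l.find? q := by
  induction l with
  | nil => rfl
  | cons x xs ih =>
    rw [List.find?_cons, List.find?_cons, h x (by simp)]
    cases hq : q x
    · exact ih fun y hy => h y (List.mem_cons_of_mem _ hy)
    · rfl

lemma find?_range_reverse_max {n : Nat} {p : Nat → Bool} {a : Nat}
    (h : ((List.range n).reverse).find? p = some a) :
    ∀ b : Nat, a < b → b < n → p b = false := by
  induction n with
  | zero => simp at h
  | succ n ih =>
    rw [List.range_succ, List.reverse_append] at h
    simp only [List.reverse_cons, List.reverse_nil, List.nil_append, List.singleton_append,
      List.find?_cons] at h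
    intro b hab hbn
    cases hp : p n
    · rw [hp] at h
      rcases Nat.lt_succ_iff_lt_or_eq.mp hbn with hb | rfl
      · exact ih h b hab hb
      · exact hp
    · rw [hp] at h
      have : a = n := by simpa using h.symm
      omega

-- the common canonical form of both pivot scans
def pvPN (lst : List Int) (k : Nat) : Bool :=
  decide (PySem.List.pyGetD lst (k : Int) 0 < PySem.List.pyGetD lst ((k : Int) + 1) 0)

lemma tA_eq (lst : List Int) :
    kLstFindT lst (PySem.List.pyRange ((lst.length : Int) - 1) 0 (-1))
      = (((List.range (lst.length - 1)).reverse.find? (pvPN lst)).map (fun k : Nat => (k : Int))).getD (-3) := by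
  have hrange : PySem.List.pyRange ((lst.length : Int) - 1) 0 (-1)
      = (List.range (lst.length - 1)).reverse.map (fun k : Nat => (k : Int) + 1) := by
    rw [PySem.List.pyRange_neg_one_eq_reverse]
    have e : (0 : Int) + 1 = 1 := by norm_num
    have e2 : (lst.length : Int) - 1 + 1 = (lst.length : Int) := by ring
    rw [e, e2, PySem.List.pyRange_one]
    rw [show ((lst.length : Int) - 1).toNat = lst.length - 1 from by omega]
    rw [show (fun k : Nat => (1 : Int) + ↑k) = (fun k : Nat => (k : Int) + 1) from by
      funext k; ring]
    exact List.map_reverse.symm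
  rw [hrange, findT_eq, List.find?_map]
  rw [findq_congr _ _ (pvPN lst) (by
    intro k _
    simp only [Function.comp_apply, pvPN]
    rw [show (k : Int) + 1 - 1 = (k : Int) from by ring])]
  cases h : (List.range (lst.length - 1)).reverse.find? (pvPN lst) with
  | none => simp [h]
  | some k => simp [h]

lemma tB_eq (lst : List Int) :
    (PySem.List.pyRange 0 ((lst.length : Int) - 1) 1).foldl
        (fun t i => if PySem.List.pyGetD lst i 0 < PySem.List.pyGetD lst (i + 1) 0 then i else t) (-1)
      = (((List.range (lst.length - 1)).reverse.find? (pvPN lst)).map (fun k : Nat => (k : Int))).getD (-1) := by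
  have heq : (fun (t i : Int) => if PySem.List.pyGetD lst i 0 < PySem.List.pyGetD lst (i + 1) 0 then i else t)
      = fun t i => if (fun j => decide (PySem.List.pyGetD lst j 0 < PySem.List.pyGetD lst (j + 1) 0)) i then i else t := by
    funext t i; simp
  rw [heq, foldl_keepLast]
  have hrange : PySem.List.pyRange 0 ((lst.length : Int) - 1) 1
      = (List.range (lst.length - 1)).map (fun k : Nat => (k : Int)) := by
    rw [PySem.List.pyRange_one]
    rw [show ((lst.length : Int) - 1 - 0).toNat = lst.length - 1 from by omega]
    rw [show (fun k : Nat => (0 : Int) + ↑k) = (fun k : Nat => (k : Int)) from by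
      funext k; ring]
  rw [hrange, ← List.map_reverse, List.find?_map]
  rw [findq_congr _ _ (pvPN lst) (by intro k _; simp [pvPN])]

-- ---- order facts ----

-- adjacent descents from position a onward give monotone descent
lemma mono_on (lst : List Int) (a : Nat)
    (h : ∀ b : Nat, a ≤ b → b + 1 < lst.length → lst.getD (b + 1) 0 ≤ lst.getD b 0) :
    ∀ i j : Nat, a ≤ i → i ≤ j → j < lst.length → lst.getD j 0 ≤ lst.getD i 0 := by
  intro i j ha
  induction j with
  | zero =>
    intro hij _
    have : i = 0 := by omega
    simp [this]
  | succ j ih =>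
    intro hij hj
    rcases Nat.eq_or_lt_of_le hij with rfl | hlt
    · exact le_refl _
    · exact le_trans (h j (by omega) (by omega)) (ih (by omega) (by omega))

lemma pvPN_true_iff (lst : List Int) (b : Nat) :
    pvPN lst b = true ↔ lst.getD b 0 < lst.getD (b + 1) 0 := by
  unfold pvPN
  rw [show ((b : Int) + 1) = ((b + 1 : Nat) : Int) from by push_cast; ring]
  rw [PySem.List.pyGetD_natCast, PySem.List.pyGetD_natCast]
  simp

-- ---- the wraparound branch: a non-increasing list reversed is its sorted order ----
lemma wrap_case (lst : List Int)
    (h : ∀ b : Nat, b < lst.length - 1 → pvPN lst b = false) :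
    PySem.List.sorted lst (fun x => x) false = lst.reverse := by
  apply PySem.List.sorted_id_eq_of_perm_of_pairwise
  · exact lst.reverse_perm
  · rw [List.pairwise_reverse, List.pairwise_iff_getElem]
    intro i j hi hj hij
    have hmono := mono_on lst 0 (fun b _ hb => by
      have hfalse := h b (by omega)
      have : ¬ (lst.getD b 0 < lst.getD (b + 1) 0) := by
        intro hc
        rw [← pvPN_true_iff] at hc
        simp [hc] at hfalse
      omega) i j (by omega) (by omega) (by omega)
    rw [List.getD_eq_getElem lst 0 hi, List.getD_eq_getElem lst 0 hj] at hmono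
    exact hmono

-- ---- min? identification ----
lemma min?_eq_of_mem_of_le (xs : List Int) (v : Int) (hv : v ∈ xs) (hle : ∀ y ∈ xs, v ≤ y) :
    PySem.List.min? xs (fun x => x) = some v := by
  cases h : PySem.List.min? xs (fun x => x) with
  | none =>
    rw [PySem.List.min?_eq_none_iff] at h
    subst h
    simp at hv
  | some w =>
    have hw : w ∈ xs := PySem.List.min?_mem h
    have hmin := PySem.List.min?_isMin h v hv
    have := hle w hw
    have : w = v := le_antisymm hmin this
    rw [this]

-- ---- splitting the double set ----
lemma take_set_set (lst : List Int) (t0 n0 : Nat) (h1 : t0 < n0) (h2 : n0 < lst.length)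
    (u v : Int) :
    ((lst.set t0 u).set n0 v).take (t0 + 1) = lst.take t0 ++ [u] := by
  apply List.ext_getElem
  · simp
    omega
  · intro i hi hi'
    simp only [List.getElem_take, List.getElem_set]
    rcases Nat.lt_or_ge i t0 with hc | hc
    · rw [List.getElem_append_left (by simp; omega), List.getElem_take]
      rw [if_neg (by omega), if_neg (by omega)]
    · have : i = t0 := by simp at hi; omega
      subst this
      rw [List.getElem_append_right (by simp)]
      rw [if_neg (by omega), if_pos rfl]
      simp

lemma drop_set_set (lst : List Int) (t0 n0 : Nat) (h1 : t0 < n0) (h2 : n0 < lst.length)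
    (u v : Int) :
    ((lst.set t0 u).set n0 v).drop (t0 + 1) = (lst.drop (t0 + 1)).set (n0 - t0 - 1) v := by
  apply List.ext_getElem
  · simp
  · intro i hi hi'
    simp only [List.getElem_drop, List.getElem_set]
    rcases Nat.decEq (n0 - t0 - 1) i with h | h
    · rw [if_neg (by omega), if_neg (by omega), if_neg (by omega)]
    · rw [if_pos (by omega), if_pos (by omega)]

-- ---- permutation fact for the rebuilt suffix ----
lemma set_perm_erase (xs : List Int) (q : Nat) (hq : q < xs.length) (v : Int) :
    (xs.set q v).Perm (xs.erase xs[q] ++ [v]) := by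
  have h1 : xs.set q v = xs.take q ++ v :: xs.drop (q + 1) :=
    List.set_eq_take_cons_drop v hq
  have h2 : xs = xs.take q ++ xs[q] :: xs.drop (q + 1) := by
    conv_lhs => rw [← List.take_append_drop q xs]
    rw [← List.getElem_cons_drop hq]
  have hmem : xs[q] ∈ xs := List.getElem_mem hq
  have h3 : xs.Perm (xs[q] :: xs.erase xs[q]) := List.perm_cons_erase hmem
  have h6 : xs.Perm (xs[q] :: (xs.take q ++ xs.drop (q + 1))) := by
    conv_lhs => rw [h2]
    exact List.perm_middle
  have h5 : (xs.erase xs[q]).Perm (xs.take q ++ xs.drop (q + 1)) :=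
    List.Perm.cons_inv (h3.symm.trans h6)
  have hA : (xs.set q v).Perm (v :: (xs.take q ++ xs.drop (q + 1))) := by
    rw [h1]
    exact List.perm_middle
  have hB : (v :: (xs.take q ++ xs.drop (q + 1))).Perm (v :: xs.erase xs[q]) :=
    (h5.symm).cons v
  exact (hA.trans hB).trans (List.perm_append_singleton v (xs.erase xs[q])).symm

-- the pivot branch: A's swap-and-reverse equals B's min-and-sort rebuild
lemma pivot_case (lst : List Int) (t0 : Nat) (ht : t0 + 1 < lst.length)
    (hpt : pvPN lst t0 = true)
    (hmax : ∀ b : Nat, t0 < b → b < lst.length - 1 → pvPN lst b = false) :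
    kLstPivot lst ↑t0
      = match PySem.List.min?
            ((PySem.List.slice lst (some ((t0 : Int) + 1)) none).filter
              (fun x => decide (PySem.List.pyGetD lst (t0 : Int) 0 < x))) (fun x => x) with
        | none => lst
        | some succ =>
            PySem.List.slice lst none (some (t0 : Int)) ++ [succ] ++
              PySem.List.sorted
                ((PySem.List.remove? (PySem.List.slice lst (some ((t0 : Int) + 1)) none) succ).getD
                    (PySem.List.slice lst (some ((t0 : Int) + 1)) none) ++
                  [PySem.List.pyGetD lst (t0 : Int) 0]) (fun x => x) false := by
  have hptv : lst.getD t0 0 < lst.getD (t0 + 1) 0 := (pvPN_true_iff lst t0).mp hpt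
  have hdesc : ∀ b : Nat, t0 + 1 ≤ b → b + 1 < lst.length → lst.getD (b + 1) 0 ≤ lst.getD b 0 := by
    intro b hb hb1
    have hfalse := hmax b (by omega) (by omega)
    have h2 : ¬ (lst.getD b 0 < lst.getD (b + 1) 0) := by
      intro hc
      rw [← pvPN_true_iff] at hc
      simp [hc] at hfalse
    omega
  have hmono := mono_on lst (t0 + 1) hdesc
  -- A's inner keep-last fold, in canonical find? form
  have hfold : (PySem.List.pyRange ↑t0 (lst.length : Int) 1).foldl
      (fun n j => if PySem.List.pyGetD lst ↑t0 0 < PySem.List.pyGetD lst j 0 then j else n) (↑t0 + 1)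
      = (((List.range (lst.length - t0)).reverse.find?
            (fun k : Nat => decide (lst.getD t0 0 < lst.getD (t0 + k) 0))).map
          (fun k : Nat => (t0 : Int) + (k : Int))).getD (↑t0 + 1) := by
    rw [show (fun (n j : Int) => if PySem.List.pyGetD lst ↑t0 0 < PySem.List.pyGetD lst j 0 then j else n)
        = fun n j => if (fun j => decide (PySem.List.pyGetD lst ↑t0 0 < PySem.List.pyGetD lst j 0)) j then j else n from by
      funext n j; simp]
    rw [foldl_keepLast]
    rw [show PySem.List.pyRange ↑t0 (lst.length : Int) 1
        = (List.range (lst.length - t0)).map (fun k : Nat => (t0 : Int) + (k : Int)) from by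
      rw [PySem.List.pyRange_one]
      rw [show ((lst.length : Int) - ↑t0).toNat = lst.length - t0 from by omega]]
    rw [← List.map_reverse, List.find?_map]
    rw [findq_congr _ _ (fun k : Nat => decide (lst.getD t0 0 < lst.getD (t0 + k) 0)) (by
      intro k _
      simp only [Function.comp_apply]
      rw [show ((t0 : Int) + (k : Int)) = ((t0 + k : Nat) : Int) from by push_cast; ring]
      rw [PySem.List.pyGetD_natCast, PySem.List.pyGetD_natCast])]
  obtain ⟨k0, hk0⟩ : ∃ k0, (List.range (lst.length - t0)).reverse.find?
      (fun k : Nat => decide (lst.getD t0 0 < lst.getD (t0 + k) 0)) = some k0 := by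
    cases h : (List.range (lst.length - t0)).reverse.find?
        (fun k : Nat => decide (lst.getD t0 0 < lst.getD (t0 + k) 0)) with
    | some k => exact ⟨k, rfl⟩
    | none =>
      exfalso
      have h1 := List.find?_eq_none.mp h 1 (by
        rw [List.mem_reverse, List.mem_range]
        omega)
      exact h1 (by simpa using hptv)
  have hqk : lst.getD t0 0 < lst.getD (t0 + k0) 0 := by simpa using List.find?_some hk0
  have hkm : k0 < lst.length - t0 := by
    have := List.mem_of_find?_eq_some hk0
    rw [List.mem_reverse, List.mem_range] at this
    exact this
  have hqmax : ∀ b : Nat, k0 < b → b < lst.length - t0 → ¬ (lst.getD t0 0 < lst.getD (t0 + b) 0) := by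
    intro b hb1 hb2
    have := find?_range_reverse_max hk0 b hb1 hb2
    simpa using this
  have hk1 : 1 ≤ k0 := by
    by_contra hc
    push_neg at hc
    have : k0 = 0 := by omega
    subst this
    simp at hqk
  -- rewrite the port's pivot step
  simp only [kLstPivot]
  rw [hfold, hk0]
  simp only [Option.map_some, Option.getD_some]
  rw [show ((t0 : Int) + (k0 : Int)) = ((t0 + k0 : Nat) : Int) from by push_cast; ring]
  rw [show ((t0 : Int) + 1) = ((t0 + 1 : Nat) : Int) from by push_cast; ring]
  simp only [PySem.List.pySetD_natCast, PySem.List.pyGetD_natCast,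
    PySem.List.slice_to_natCast, PySem.List.slice_from_natCast]
  rw [take_set_set lst t0 (t0 + k0) (by omega) (by omega),
    drop_set_set lst t0 (t0 + k0) (by omega) (by omega)]
  rw [show t0 + k0 - t0 - 1 = k0 - 1 from by omega]
  -- B's side: identify the successor
  have hsl : (lst.drop (t0 + 1)).length = lst.length - (t0 + 1) := by simp
  have hlt : k0 - 1 < (lst.drop (t0 + 1)).length := by omega
  have hidx : (lst.drop (t0 + 1))[k0 - 1]'hlt = lst.getD (t0 + k0) 0 := by
    rw [List.getElem_drop]
    rw [List.getD_eq_getElem lst 0 (by omega)]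
    congr 1
    omega
  have hsg : ∀ (x : Nat) (hx : x < (lst.drop (t0 + 1)).length),
      (lst.drop (t0 + 1))[x]'hx = lst.getD (t0 + 1 + x) 0 := by
    intro x hx
    rw [List.getElem_drop, List.getD_eq_getElem lst 0 (by omega)]
  have hscmem : lst.getD (t0 + k0) 0 ∈ (lst.drop (t0 + 1)).filter
      (fun x => decide (lst.getD t0 0 < x)) := by
    rw [List.mem_filter]
    refine ⟨hidx ▸ List.getElem_mem hlt, by simpa using hqk⟩
  have hmin : ∀ y ∈ (lst.drop (t0 + 1)).filter (fun x => decide (lst.getD t0 0 < x)),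
      lst.getD (t0 + k0) 0 ≤ y := by
    intro y hy
    rw [List.mem_filter] at hy
    obtain ⟨hy1, hy2⟩ := hy
    obtain ⟨i, hi, hyi⟩ := List.mem_iff_getElem.mp hy1
    rw [hsg i hi] at hyi
    subst hyi
    by_cases hc : t0 + 1 + i <= t0 + k0
    · exact hmono (t0 + 1 + i) (t0 + k0) (by omega) (by omega) (by omega)
    · exfalso
      rw [not_le] at hc
      have hb := hqmax (1 + i) (by omega) (by omega)
      rw [show t0 + (1 + i) = t0 + 1 + i from by omega] at hb
      simp at hy2
      exact hb hy2
  rw [min?_eq_of_mem_of_le _ _ hscmem hmin]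
  dsimp only
  rw [PySem.List.remove?_eq_some_erase _ _ ((List.mem_filter.mp hscmem).1)]
  simp only [Option.getD_some]
  -- the rebuilt suffix: sorted(erased ++ [pivot]) is the reversed swapped suffix
  have hsorted : PySem.List.sorted
      ((lst.drop (t0 + 1)).erase (lst.getD (t0 + k0) 0) ++ [lst.getD t0 0]) (fun x => x) false
      = ((lst.drop (t0 + 1)).set (k0 - 1) (lst.getD t0 0)).reverse := by
    apply PySem.List.sorted_id_eq_of_perm_of_pairwise
    · have hperm := set_perm_erase (lst.drop (t0 + 1)) (k0 - 1) hlt (lst.getD t0 0)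
      rw [hidx] at hperm
      exact ((lst.drop (t0 + 1)).set (k0 - 1) (lst.getD t0 0)).reverse_perm.trans hperm
    · rw [List.pairwise_reverse, List.pairwise_iff_getElem]
      intro i j hi hj hij
      simp only [List.length_set] at hi hj
      rw [List.getElem_set, List.getElem_set]
      by_cases h1 : k0 - 1 = j
      · rw [if_pos h1, if_neg (by omega)]
        have h2 : lst.getD (t0 + k0) 0 ≤ (lst.drop (t0 + 1))[i]'(by omega) := by
          rw [hsg i (by omega)]
          exact hmono (t0 + 1 + i) (t0 + k0) (by omega) (by omega) (by omega)
        omega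
      · rw [if_neg h1]
        by_cases h2 : k0 - 1 = i
        · rw [if_pos h2]
          have hb := hqmax (1 + j) (by omega) (by omega)
          rw [show t0 + (1 + j) = t0 + 1 + j from by omega] at hb
          rw [hsg j (by omega)]
          omega
        · rw [if_neg h2]
          rw [hsg i (by omega), hsg j (by omega)]
          exact hmono (t0 + 1 + i) (t0 + 1 + j) (by omega) (by omega) (by omega)
  rw [hsorted]

lemma step_eq (lst : List Int) : kLstStep lst = kLstAltStep lst := by
  simp only [kLstStep, kLstAltStep]
  rw [tA_eq, tB_eq]
  cases hF : (List.range (lst.length - 1)).reverse.find? (pvPN lst) with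
  | none =>
    simp only [hF, Option.map_none, Option.getD_none, reduceIte]
    refine (wrap_case lst ?_).symm
    intro b hb
    have := List.find?_eq_none.mp hF b (by
      rw [List.mem_reverse, List.mem_range]
      omega)
    simpa using this
  | some t0 =>
    simp only [hF, Option.map_some, Option.getD_some]
    rw [if_neg (by omega), if_neg (by omega)]
    have hmem := List.mem_of_find?_eq_some hF
    have ht : t0 < lst.length - 1 := by
      rw [List.mem_reverse, List.mem_range] at hmem
      omega
    exact pivot_case lst t0 (by omega) (List.find?_some hF) (find?_range_reverse_max hF)

-- ===== VERDICT =====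
theorem k_lst_spec : Claim_equal_k_lst := by
  intro lst k _ hpre
  unfold Spec_k_lst
  rw [k_lst_eq_iterate k.toNat lst k rfl hpre.1, k_lst_alt_eq_iterate]
  have : kLstStep = kLstAltStep := funext step_eq
  rw [this]
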